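-- pv_equiv track=rewrite | github.com/vittoriocandiello/blenderscripts | render_blender_cubes_frames.py | sanitize_frame_indices
-- ===== SOURCE A (Python) =====
-- def sanitize_frame_indices(frame_indices, n_frames):
--     selected = []
--     seen = set()
--     for idx in frame_indices:
--         resolved = idx if idx >= 0 else (n_frames + idx)
--         if resolved < 0 or resolved >= n_frames:
--             raise IndexError(
--                 f"Frame index {idx} is out of range for {n_frames} frames "
--                 f"(valid range: 0..{n_frames - 1}, negatives allowed)."
--             )
--         if resolved in seen:
--             continue
--         selected.append(resolved)
--         seen.add(resolved)
--     if not selected: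
--         raise ValueError("No unique frame indices left after validation.")
--     return selected
-- ===== SOURCE B (Python) =====
-- def sanitize_frame_indices(frame_indices, n_frames):
--     resolved = []
--     for idx in frame_indices:
--         r = idx if idx >= 0 else n_frames + idx
--         if not (0 <= r < n_frames):
--             raise IndexError(
--                 f"Frame index {idx} is out of range for {n_frames} frames "
--                 f"(valid range: 0..{n_frames - 1}, negatives allowed)."
--             )
--         resolved.append(r)
--     if not resolved:
--         raise ValueError("No unique frame indices left after validation.")
--
--     def dedup(xs):
--         if not xs:
--             return []
--         head = xs[0]
--         return [head] + dedup([x for x in xs[1:] if x != head])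
--
--     return dedup(resolved)
-- ===== Notes on version B (the rewrite author's own statement) =====
-- stated objective: alternative
-- what changed: B validates/resolves in a first pass and then deduplicates by a head-and-filter recursion (take the first element, strip all its duplicates from the tail, recurse), instead of A's single streaming pass that maintains a seen-set.
import Mathlib
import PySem

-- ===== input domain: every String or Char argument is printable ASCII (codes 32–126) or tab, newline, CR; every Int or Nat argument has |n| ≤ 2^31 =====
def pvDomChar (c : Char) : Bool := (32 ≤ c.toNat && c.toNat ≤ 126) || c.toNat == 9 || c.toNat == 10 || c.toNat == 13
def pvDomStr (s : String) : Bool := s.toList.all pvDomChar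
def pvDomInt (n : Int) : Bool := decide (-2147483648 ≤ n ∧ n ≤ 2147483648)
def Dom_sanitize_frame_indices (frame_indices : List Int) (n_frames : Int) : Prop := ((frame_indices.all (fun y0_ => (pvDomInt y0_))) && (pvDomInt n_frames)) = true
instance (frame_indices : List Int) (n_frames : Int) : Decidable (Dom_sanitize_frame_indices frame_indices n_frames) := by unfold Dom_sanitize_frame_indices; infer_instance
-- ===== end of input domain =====

-- ===== PORT A =====
-- B replaces A's streaming seen-set pass by a validation pass plus a head-and-filter recursive dedup; same values, no speed claim.
def sanitize_frame_indices (frame_indices : List Int) (n_frames : Int) : List Int :=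
  (frame_indices.foldl
    (fun (acc : List Int × PySem.Set Int) idx =>
      let selected := acc.1
      let seen := acc.2
      let resolved := if idx ≥ 0 then idx else n_frames + idx
      if resolved < 0 ∨ resolved ≥ n_frames then acc  -- Python raises IndexError here; excluded by Pre_
      else if PySem.Set.contains seen resolved then (selected, seen)
      else (selected ++ [resolved], PySem.Set.add seen resolved))
    ([], PySem.Set.empty)).1
  -- Python raises ValueError when the result is empty; excluded by Pre_

-- ===== PORT B =====
-- dedup(xs): take the head, strip its duplicates from the tail, recurse
def pvDedupB (l : List Int) : List Int :=
  match l with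
  | [] => []
  | x :: xs => x :: pvDedupB (xs.filter (fun y => y ≠ x))
termination_by l.length
decreasing_by
  simp only [List.length_cons, List.length_unattach]
  exact Nat.lt_succ_of_le (le_trans (List.length_filter_le _ _) (le_of_eq List.length_attach))

def sanitize_frame_indices_alt (frame_indices : List Int) (n_frames : Int) : List Int :=
  -- first pass: resolve and validate each index in order (Python raises IndexError on a bad
  -- one and ValueError on an empty result; both are excluded by Pre_)
  let resolved := frame_indices.foldl
    (fun (acc : List Int) idx =>
      let r := if idx ≥ 0 then idx else n_frames + idx
      if ¬ (0 ≤ r ∧ r < n_frames) then acc  -- Python raises IndexError here; excluded by Pre_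
      else acc ++ [r])
    []
  pvDedupB resolved

-- ===== PRECONDITION & SPEC =====
-- Pre_ excludes exactly the inputs where A raises: an index whose resolved value is out of
-- range (IndexError) or an empty input list (ValueError).
def Pre_sanitize_frame_indices (frame_indices : List Int) (n_frames : Int) : Prop :=
  frame_indices ≠ [] ∧
  ∀ idx ∈ frame_indices,
    0 ≤ (if idx ≥ 0 then idx else n_frames + idx) ∧
    (if idx ≥ 0 then idx else n_frames + idx) < n_frames
instance (frame_indices : List Int) (n_frames : Int) : Decidable (Pre_sanitize_frame_indices frame_indices n_frames) := by unfold Pre_sanitize_frame_indices; infer_instance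
def pvWitness_sanitize_frame_indices : List Int × Int := ([0, -1, 2, 2], 5)

def Spec_sanitize_frame_indices (frame_indices : List Int) (n_frames : Int) (out : List Int) : Prop := out = sanitize_frame_indices_alt frame_indices n_frames
instance (frame_indices : List Int) (n_frames : Int) (out : List Int) : Decidable (Spec_sanitize_frame_indices frame_indices n_frames out) := by unfold Spec_sanitize_frame_indices; infer_instance

-- ===== CLAIM =====
def Claim_equal_sanitize_frame_indices : Prop := ∀ (frame_indices : List Int) (n_frames : Int), Dom_sanitize_frame_indices frame_indices n_frames → Pre_sanitize_frame_indices frame_indices n_frames → Spec_sanitize_frame_indices frame_indices n_frames (sanitize_frame_indices frame_indices n_frames)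

-- ===== LEMMAS AND PROOFS =====

-- A's loop, with selected and seen sharing the same list, is a fold of Set.add over the
-- resolved indices, provided every index is in range.
theorem pv_foldA_eq_foldAdd (n_frames : Int) :
    ∀ (fi : List Int) (s : List Int),
      (∀ idx ∈ fi,
        0 ≤ (if idx ≥ 0 then idx else n_frames + idx) ∧
        (if idx ≥ 0 then idx else n_frames + idx) < n_frames) →
      (fi.foldl
        (fun (acc : List Int × PySem.Set Int) idx =>
          let selected := acc.1
          let seen := acc.2
          let resolved := if idx ≥ 0 then idx else n_frames + idx
          if resolved < 0 ∨ resolved ≥ n_frames then acc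
          else if PySem.Set.contains seen resolved then (selected, seen)
          else (selected ++ [resolved], PySem.Set.add seen resolved))
        (s, s)).1
      = (fi.map (fun idx => if idx ≥ 0 then idx else n_frames + idx)).foldl PySem.Set.add s := by
  intro fi
  induction fi with
  | nil => intro s _; rfl
  | cons idx rest ih =>
    intro s h
    obtain ⟨h1, h2⟩ := h idx (List.mem_cons_self ..)
    have hrest := fun i hi => h i (List.mem_cons_of_mem _ hi)
    simp only [List.foldl_cons, List.map_cons]
    have hnot : ¬((if idx ≥ 0 then idx else n_frames + idx) < 0 ∨
        (if idx ≥ 0 then idx else n_frames + idx) ≥ n_frames) := by omega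
    simp only [hnot, if_false]
    by_cases hc : PySem.Set.contains s (if idx ≥ 0 then idx else n_frames + idx)
    · have hadd : PySem.Set.add s (if idx ≥ 0 then idx else n_frames + idx) = s := by
        unfold PySem.Set.add; rw [if_pos hc]
      simp only [hc, if_true, hadd]
      exact ih s hrest
    · have hadd : PySem.Set.add s (if idx ≥ 0 then idx else n_frames + idx)
          = s ++ [if idx ≥ 0 then idx else n_frames + idx] := by
        unfold PySem.Set.add; rw [if_neg hc]
      simp only [hc, hadd]
      exact ih _ hrest

-- B's validation loop is a map when every index is in range.
theorem pv_foldB_eq_map (n_frames : Int) :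
    ∀ (fi : List Int) (acc : List Int),
      (∀ idx ∈ fi,
        0 ≤ (if idx ≥ 0 then idx else n_frames + idx) ∧
        (if idx ≥ 0 then idx else n_frames + idx) < n_frames) →
      fi.foldl
        (fun (acc : List Int) idx =>
          let r := if idx ≥ 0 then idx else n_frames + idx
          if ¬ (0 ≤ r ∧ r < n_frames) then acc else acc ++ [r])
        acc
      = acc ++ fi.map (fun idx => if idx ≥ 0 then idx else n_frames + idx) := by
  intro fi
  induction fi with
  | nil => intro acc _; simp
  | cons idx rest ih =>
    intro acc h
    obtain ⟨h1, h2⟩ := h idx (List.mem_cons_self ..)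
    have hrest := fun i hi => h i (List.mem_cons_of_mem _ hi)
    simp only [List.foldl_cons, List.map_cons]
    have hok : ¬ ¬ (0 ≤ (if idx ≥ 0 then idx else n_frames + idx) ∧
        (if idx ≥ 0 then idx else n_frames + idx) < n_frames) := by omega
    rw [if_neg hok, ih _ hrest]
    simp

-- folding Set.add over l starting from s appends the head-and-filter dedup of the
-- elements of l not already in s.
theorem pv_foldAdd_eq_dedupB :
    ∀ (l : List Int) (s : List Int),
      l.foldl PySem.Set.add s
        = s ++ pvDedupB (l.filter (fun x => !(PySem.Set.contains s x))) := by
  intro l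
  induction l with
  | nil => intro s; simp [pvDedupB]
  | cons x rest ih =>
    intro s
    simp only [List.foldl_cons, List.filter_cons]
    by_cases hc : PySem.Set.contains s x = true
    · have hadd : PySem.Set.add s x = s := by unfold PySem.Set.add; rw [if_pos hc]
      simp only [hc, Bool.not_true, if_false, hadd]
      exact ih s
    · have hc' : PySem.Set.contains s x = false := by
        exact Bool.not_eq_true _ |>.mp hc
      have hadd : PySem.Set.add s x = s ++ [x] := by unfold PySem.Set.add; rw [if_neg hc]
      simp only [hc', Bool.not_false, if_true, hadd]
      rw [ih (s ++ [x])]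
      conv_rhs => rw [pvDedupB]
      rw [List.append_assoc, List.singleton_append]
      congr 2
      rw [List.filter_filter]
      refine congrArg pvDedupB (List.filter_congr ?_)
      intro a _
      by_cases hax : a = x
      · subst hax
        simp [PySem.Set.contains]
      · simp [PySem.Set.contains, hax]

-- ===== VERDICT =====
theorem sanitize_frame_indices_spec : Claim_equal_sanitize_frame_indices := by
  intro fi n _ hpre
  unfold Spec_sanitize_frame_indices sanitize_frame_indices sanitize_frame_indices_alt
  rw [show (PySem.Set.empty : PySem.Set Int) = ([] : List Int) from rfl]
  rw [pv_foldA_eq_foldAdd n fi [] hpre.2]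
  rw [pv_foldB_eq_map n fi [] hpre.2]
  rw [pv_foldAdd_eq_dedupB]
  simp [PySem.Set.contains]
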